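-- pv_equiv track=rewrite | github.com/Samrfgh/Project-Euler | Problem 28.py | sum_of_spiral
-- ===== SOURCE A (Python) =====
-- def sum_of_spiral(side_length):
--     spiral = []
--     i = side_length ** 2
--     if side_length == 1:
--         return 1
--     while len(spiral) < 4:
--         spiral.append(i)
--         i = i - side_length + 1
--     return sum(spiral)
-- ===== SOURCE B (Python) =====
-- def sum_of_spiral(side_length):
--     if side_length == 1:
--         return 1
--     return 4 * side_length ** 2 - 6 * side_length + 6
-- ===== Notes on version B (the rewrite author's own statement) =====
-- stated objective: simpler
-- what changed: Replaced the list-building while-loop and sum with a single closed-form polynomial in side_length for the four corner values.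
import Mathlib
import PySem

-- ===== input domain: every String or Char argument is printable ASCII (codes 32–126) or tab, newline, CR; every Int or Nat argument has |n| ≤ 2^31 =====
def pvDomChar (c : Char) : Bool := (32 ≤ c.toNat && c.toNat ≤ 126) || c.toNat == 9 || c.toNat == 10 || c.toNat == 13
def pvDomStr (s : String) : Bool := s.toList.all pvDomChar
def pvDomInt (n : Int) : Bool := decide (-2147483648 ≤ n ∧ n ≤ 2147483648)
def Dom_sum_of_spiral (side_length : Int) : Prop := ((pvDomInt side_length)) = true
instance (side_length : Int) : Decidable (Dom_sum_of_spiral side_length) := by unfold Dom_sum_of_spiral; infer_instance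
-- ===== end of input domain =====

-- B replaces A's list-building while-loop with the closed-form polynomial 4n^2-6n+6 (simpler).

-- ===== PORT A =====
-- while len(spiral) < 4: spiral.append(i); i = i - side_length + 1
def sum_of_spiral_loop (side_length : Int) (spiral : List Int) (i : Int) : List Int :=
  if h : spiral.length < 4 then
    sum_of_spiral_loop side_length (spiral ++ [i]) (i - side_length + 1)
  else spiral
termination_by 4 - spiral.length
decreasing_by simp; omega

def sum_of_spiral (side_length : Int) : Int :=
  let i := side_length ^ 2
  if side_length = 1 then 1
  else (sum_of_spiral_loop side_length [] i).sum

-- ===== PORT B =====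
def sum_of_spiral_alt (side_length : Int) : Int :=
  if side_length = 1 then 1
  else 4 * side_length ^ 2 - 6 * side_length + 6

-- ===== PRECONDITION & SPEC =====
def Spec_sum_of_spiral (side_length : Int) (out : Int) : Prop := out = sum_of_spiral_alt side_length
instance (side_length : Int) (out : Int) : Decidable (Spec_sum_of_spiral side_length out) := by unfold Spec_sum_of_spiral; infer_instance

-- ===== CLAIM (what is proved, stated in full; the proofs are below) =====
def Claim_equal_sum_of_spiral : Prop := ∀ (side_length : Int), Dom_sum_of_spiral side_length → Spec_sum_of_spiral side_length (sum_of_spiral side_length)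

-- ===== LEMMAS AND PROOFS =====
theorem sum_of_spiral_loop_eval (n i : Int) :
    sum_of_spiral_loop n [] i
      = [i, i - n + 1, (i - n + 1) - n + 1, ((i - n + 1) - n + 1) - n + 1] := by
  rw [sum_of_spiral_loop, sum_of_spiral_loop, sum_of_spiral_loop, sum_of_spiral_loop,
      sum_of_spiral_loop]
  simp

-- ===== VERDICT (by name: the statement is the Claim_ definition above) =====
theorem sum_of_spiral_spec : Claim_equal_sum_of_spiral := by
  intro n _
  unfold Spec_sum_of_spiral sum_of_spiral sum_of_spiral_alt
  by_cases h : n = 1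
  · simp [h]
  · simp only [h, if_false]
    rw [sum_of_spiral_loop_eval]
    simp [List.sum]
    ring
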